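-- pv_equiv track=rewrite | github.com/junsu-kim0807/ssd | profile/gen_profile_script.py | format_multiline_cmd
-- ===== SOURCE A (Python) =====
-- import shlex
-- from typing import Callable, Iterable, Sequence
--
-- def format_multiline_cmd(argv: Sequence[str]) -> str:
--     """Render bash command with '\' continuations.
--
--     Style:
--       python -O bench/bench.py \
--         --qwen \
--         --gpus 2 \
--         --b 1 \
--         --temp 0.0 \
--         --numseqs 512 \
--         --output_len 2048 \
--         --humaneval
--     """
--     if not argv:
--         return ""
--
--     def _fmt(tok: str) -> str:
--         q = shlex.quote(str(tok))
--         return tok if q == tok else q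
--
--     lines: list[str] = []
--
--     i = 0
--     first = True
--     while i < len(argv):
--         tok = argv[i]
--
--         if first and len(argv) >= 3:
--             head = " ".join(_fmt(x) for x in argv[:3])
--             lines.append(head + (" \\" if len(argv) > 3 else ""))
--             i = 3
--             first = False
--             continue
--
--         if tok.startswith("--") and i + 1 < len(argv) and not argv[i + 1].startswith("--"):
--             part = f"  {_fmt(tok)} {_fmt(argv[i + 1])}"
--             i += 2
--         else:
--             part = f"  {_fmt(tok)}"
--             i += 1
--
--         if i < len(argv):
--             part += " \\"
--         lines.append(part)
--
--     return "\n".join(lines)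
-- ===== SOURCE B (Python) =====
-- import string
--
-- _SAFE = frozenset(string.ascii_letters + string.digits + "_@%+=:,./-")
--
--
-- def _fmt(tok: str) -> str:
--     # shlex.quote, inlined: safe non-empty tokens pass through, others get single-quoted
--     q = tok if tok and all(c in _SAFE for c in tok) else "'" + tok.replace("'", "'\"'\"'") + "'"
--     return tok if q == tok else q
--
--
-- def format_multiline_cmd(argv) -> str:
--     """Render bash command with '\\' continuations (same output as the original)."""
--     if len(argv) >= 3:
--         lines = [" ".join(map(_fmt, argv[:3]))]
--         rest = argv[3:]
--     else:
--         lines = []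
--         rest = argv
--     # one-pass state machine: a "--flag" waits in `pending` to see whether the
--     # next token is its value; continuation backslashes come from the final join
--     pending = None
--     for tok in rest:
--         if pending is None:
--             if tok.startswith("--"):
--                 pending = tok
--             else:
--                 lines.append("  " + _fmt(tok))
--         elif tok.startswith("--"):
--             lines.append("  " + _fmt(pending))
--             pending = tok
--         else:
--             lines.append("  " + _fmt(pending) + " " + _fmt(tok))
--             pending = None
--     if pending is not None:
--         lines.append("  " + _fmt(pending))
--     return " \\\n".join(lines)
-- ===== Notes on version B (the rewrite author's own statement) =====
-- stated objective: alternative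
-- what changed: B replaces A's index-walking while-loop with lookahead (argv[i+1]) and per-iteration ' \' suffix bookkeeping by a single forward pass state machine: a '--flag' token is held in a `pending` slot until the next token decides whether it pairs, and the continuation backslashes come solely from a final ' \\ '.join.
import Mathlib
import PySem

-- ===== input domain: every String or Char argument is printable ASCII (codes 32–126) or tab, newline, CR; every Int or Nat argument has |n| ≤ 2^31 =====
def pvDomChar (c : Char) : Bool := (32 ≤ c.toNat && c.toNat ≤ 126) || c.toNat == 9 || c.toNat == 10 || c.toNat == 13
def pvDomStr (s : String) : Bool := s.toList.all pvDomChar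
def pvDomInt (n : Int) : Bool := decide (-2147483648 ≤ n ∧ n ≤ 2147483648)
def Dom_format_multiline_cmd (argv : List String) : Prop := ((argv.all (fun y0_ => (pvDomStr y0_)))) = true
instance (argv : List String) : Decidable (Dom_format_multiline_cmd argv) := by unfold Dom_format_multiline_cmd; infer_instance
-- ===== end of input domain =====

-- B (alternative): one forward pass holding a pending "--flag" in an Option slot instead of
-- A's index loop with argv[i+1] lookahead; continuation backslashes come from a final join.

-- ===== PORT A =====
-- shared helper of both Pythons: shlex.quote (exact on the ASCII domain: safe chars are [A-Za-z0-9_@%+=:,./-])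
def pvSafeChar (c : Char) : Bool :=
  c.isAlpha || c.isDigit || c == '_' || c == '@' || c == '%' || c == '+' || c == '=' ||
  c == ':' || c == ',' || c == '.' || c == '/' || c == '-'

def pvShlexQuote (s : String) : String :=
  if s.toList = [] then "''"
  else if s.toList.all pvSafeChar then s
  else "'" ++ PySem.Str.replace s "'" "'\"'\"'" ++ "'"

-- _fmt: quoted form unless quoting is a no-op (both Source A and Source B define it this way)
def pvFmt (tok : String) : String :=
  let q := pvShlexQuote tok
  if q = tok then tok else q

-- A's while-loop; fuel = argv.length + 1 only makes the recursion structurally total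
def pvLoopA (argv : List String) (fuel : Nat) (i : Nat) (first : Bool) : List String :=
  match fuel with
  | 0 => []
  | fuel + 1 =>
    if i < argv.length then
      if first && decide (3 ≤ argv.length) then
        let head := PySem.Str.join " " ((argv.take 3).map pvFmt)
        (head ++ (if 3 < argv.length then " \\" else "")) :: pvLoopA argv fuel 3 false
      else
        let tok := argv.getD i ""
        if PySem.Str.startswith tok "--" && decide (i + 1 < argv.length) &&
           !(PySem.Str.startswith (argv.getD (i + 1) "") "--") then
          let part := "  " ++ pvFmt tok ++ " " ++ pvFmt (argv.getD (i + 1) "")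
          (if i + 2 < argv.length then part ++ " \\" else part) :: pvLoopA argv fuel (i + 2) first
        else
          let part := "  " ++ pvFmt tok
          (if i + 1 < argv.length then part ++ " \\" else part) :: pvLoopA argv fuel (i + 1) first
    else []

def format_multiline_cmd (argv : List String) : String :=
  if argv = [] then ""
  else PySem.Str.join "\n" (pvLoopA argv (argv.length + 1) 0 true)

-- ===== PORT B =====
-- B's loop body: fold step over the tokens, `pending` holds a waiting "--flag"
def pvStep (st : List String × Option String) (tok : String) : List String × Option String :=
  match st with
  | (lines, none) =>
    if PySem.Str.startswith tok "--" then (lines, some tok)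
    else (lines ++ ["  " ++ pvFmt tok], none)
  | (lines, some p) =>
    if PySem.Str.startswith tok "--" then (lines ++ ["  " ++ pvFmt p], some tok)
    else (lines ++ ["  " ++ pvFmt p ++ " " ++ pvFmt tok], none)

-- final flush: append the still-pending flag, if any (Source B's trailing `if pending is not None`)
def pvFlush (st : List String × Option String) : List String :=
  match st.2 with
  | some p => st.1 ++ ["  " ++ pvFmt p]
  | none => st.1

def format_multiline_cmd_alt (argv : List String) : String :=
  let start : List String × List String :=
    if 3 ≤ argv.length then
      ([PySem.Str.join " " ((argv.take 3).map pvFmt)], argv.drop 3)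
    else ([], argv)
  PySem.Str.join " \\\n" (pvFlush (start.2.foldl pvStep (start.1, none)))

-- ===== PRECONDITION & SPEC =====
def Spec_format_multiline_cmd (argv : List String) (out : String) : Prop := out = format_multiline_cmd_alt argv
instance (argv : List String) (out : String) : Decidable (Spec_format_multiline_cmd argv out) := by unfold Spec_format_multiline_cmd; infer_instance

-- ===== CLAIM (what is proved, stated in full; the proofs are below) =====
def Claim_equal_format_multiline_cmd : Prop := ∀ (argv : List String), Dom_format_multiline_cmd argv → Spec_format_multiline_cmd argv (format_multiline_cmd argv)

-- ===== LEMMAS AND PROOFS =====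
def pvLine1 (t : String) : String := "  " ++ pvFmt t
def pvLine2 (t v : String) : String := "  " ++ pvFmt t ++ " " ++ pvFmt v

-- denotation of B's state machine: the lines produced from `pending` state over a token list
def pvG : Option String → List String → List String
  | none, [] => []
  | none, t :: r =>
    if PySem.Str.startswith t "--" then pvG (some t) r else pvLine1 t :: pvG none r
  | some p, [] => [pvLine1 p]
  | some p, t :: r =>
    if PySem.Str.startswith t "--" then pvLine1 p :: pvG (some t) r
    else pvLine2 p t :: pvG none r

-- decorate bare lines the way A does: " \" on every line but the last
def pvDeco : List String → List String
  | [] => []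
  | [x] => [x]
  | x :: y :: t => (x ++ " \\") :: pvDeco (y :: t)

theorem pvJoin_cons_cons (s a b : String) (t : List String) :
    PySem.Str.join s (a :: b :: t) = a ++ s ++ PySem.Str.join s (b :: t) := by
  apply String.toList_inj.mp
  simp [PySem.Str.join, PySem.Chars.join_cons_cons]

theorem pvJoin_deco (ls : List String) :
    PySem.Str.join "\n" (pvDeco ls) = PySem.Str.join " \\\n" ls := by
  induction ls with
  | nil => rfl
  | cons x t ih =>
    cases t with
    | nil => rfl
    | cons y t' =>
      have hd : pvDeco (y :: t') ≠ [] := by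
        cases t' <;> simp [pvDeco]
      obtain ⟨z, zs, hz⟩ := List.exists_cons_of_ne_nil hd
      calc PySem.Str.join "\n" (pvDeco (x :: y :: t'))
          = PySem.Str.join "\n" ((x ++ " \\") :: z :: zs) := by rw [pvDeco, hz]
        _ = (x ++ " \\") ++ "\n" ++ PySem.Str.join "\n" (z :: zs) := pvJoin_cons_cons ..
        _ = (x ++ " \\") ++ "\n" ++ PySem.Str.join "\n" (pvDeco (y :: t')) := by rw [hz]
        _ = x ++ " \\\n" ++ PySem.Str.join " \\\n" (y :: t') := by
              rw [ih]
              apply String.toList_inj.mp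
              simp
        _ = PySem.Str.join " \\\n" (x :: y :: t') := (pvJoin_cons_cons ..).symm

-- the fold with flush computes pvG
theorem pvFlush_foldl (l : List String) (acc : List String) (p : Option String) :
    pvFlush (l.foldl pvStep (acc, p)) = acc ++ pvG p l := by
  induction l generalizing acc p with
  | nil => cases p <;> simp [pvFlush, pvG, pvLine1]
  | cons t r ih =>
    cases p with
    | none =>
      by_cases h : PySem.Chars.startswith t.toList ['-','-'] = true
      · rw [List.foldl_cons, show pvStep (acc, none) t = (acc, some t) from by simp [pvStep, h], ih]
        simp [pvG, h, pvLine1, pvLine2]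
      · rw [List.foldl_cons,
            show pvStep (acc, none) t = (acc ++ ["  " ++ pvFmt t], none) from by simp [pvStep, h], ih]
        simp [pvG, h, pvLine1, pvLine2]
    | some q =>
      by_cases h : PySem.Chars.startswith t.toList ['-','-'] = true
      · rw [List.foldl_cons,
            show pvStep (acc, some q) t = (acc ++ ["  " ++ pvFmt q], some t) from by simp [pvStep, h], ih]
        simp [pvG, h, pvLine1, pvLine2]
      · rw [List.foldl_cons,
            show pvStep (acc, some q) t = (acc ++ ["  " ++ pvFmt q ++ " " ++ pvFmt t], none) from by
              simp [pvStep, h], ih]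
        simp [pvG, h, pvLine1, pvLine2]

theorem pvG_some_ne_nil (p : String) (l : List String) : pvG (some p) l ≠ [] := by
  cases l with
  | nil => simp [pvG]
  | cons t r => simp only [pvG]; split <;> simp

theorem pvG_none_ne_nil (l : List String) (h : l ≠ []) : pvG none l ≠ [] := by
  cases l with
  | nil => exact absurd rfl h
  | cons t r =>
    simp only [pvG]; split
    · exact pvG_some_ne_nil t r
    · simp

theorem pvDeco_cons_ne (x : String) (xs : List String) (h : xs ≠ []) :
    pvDeco (x :: xs) = (x ++ " \\") :: pvDeco xs := by
  obtain ⟨y, t, rfl⟩ := List.exists_cons_of_ne_nil h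
  rfl

-- A's loop (past the head line) produces exactly B's lines, decorated
theorem pvLoopA_eq (argv : List String) (fuel i : Nat) (first : Bool)
    (hfirst : first = false ∨ argv.length < 3)
    (hfuel : argv.length - i ≤ fuel) :
    pvLoopA argv fuel i first = pvDeco (pvG none (argv.drop i)) := by
  induction fuel generalizing i with
  | zero =>
    have h : argv.length ≤ i := by omega
    rw [List.drop_eq_nil_of_le h]
    simp [pvLoopA, pvG, pvDeco]
  | succ f ih =>
    by_cases h : i < argv.length
    · have hhead : (first && decide (3 ≤ argv.length)) = false := by
        rcases hfirst with h1 | h1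
        · simp [h1]
        · simp; omega
      have hdrop : argv.drop i = argv[i] :: argv.drop (i + 1) :=
        List.drop_eq_getElem_cons h
      have hget : argv.getD i "" = argv[i] := List.getD_eq_getElem argv "" h
      have hgs : argv[i]? = some argv[i] := List.getElem?_eq_getElem h
      simp only [pvLoopA, if_pos h, hhead, Bool.false_eq_true, if_false]
      by_cases h1 : i + 1 < argv.length
      · have hdrop1 : argv.drop (i + 1) = argv[i+1] :: argv.drop (i + 2) :=
          List.drop_eq_getElem_cons h1
        have hget1 : argv.getD (i + 1) "" = argv[i+1] := List.getD_eq_getElem argv "" h1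
        have hgs1 : argv[i+1]? = some argv[i+1] := List.getElem?_eq_getElem h1
        by_cases hft : PySem.Chars.startswith (argv[i].toList) ['-','-'] = true
        · by_cases hfv : PySem.Chars.startswith (argv[i+1].toList) ['-','-'] = true
          · -- flag followed by flag: single line, next token handled at i+1
            have hcond : (PySem.Str.startswith (argv.getD i "") "--" && decide (i + 1 < argv.length) &&
                !(PySem.Str.startswith (argv.getD (i + 1) "") "--")) = false := by
              simp [hgs, hgs1, hft, hfv, h1]
            rw [hcond]
            simp only [Bool.false_eq_true, if_false]
            rw [if_pos h1, ih (i + 1) (by omega), hdrop, hdrop1]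
            have : pvG none (argv[i] :: argv[i+1] :: argv.drop (i + 2))
                = pvLine1 argv[i] :: pvG (some argv[i+1]) (argv.drop (i + 2)) := by
              simp [pvG, hft, hfv]
            rw [this]
            have hne : pvG (some argv[i+1]) (argv.drop (i + 2)) ≠ [] :=
              pvG_some_ne_nil _ _
            rw [pvDeco_cons_ne _ _ hne]
            have : pvG none (argv[i+1] :: argv.drop (i + 2))
                = pvG (some argv[i+1]) (argv.drop (i + 2)) := by simp [pvG, hfv]
            rw [this, hget, pvLine1]
          · -- flag with value: pair, advance by 2
            have hcond : (PySem.Str.startswith (argv.getD i "") "--" && decide (i + 1 < argv.length) &&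
                !(PySem.Str.startswith (argv.getD (i + 1) "") "--")) = true := by
              simp [hgs, hgs1, hft, hfv, h1]
            rw [hcond, if_pos rfl]
            rw [ih (i + 2) (by omega), hdrop, hdrop1]
            have : pvG none (argv[i] :: argv[i+1] :: argv.drop (i + 2))
                = pvLine2 argv[i] argv[i+1] :: pvG none (argv.drop (i + 2)) := by
              simp [pvG, hft, hfv]
            rw [this]
            by_cases h2 : i + 2 < argv.length
            · have hne : argv.drop (i + 2) ≠ [] := by
                intro hc
                have := List.drop_eq_nil_iff.mp hc
                omega
              rw [if_pos h2, pvDeco_cons_ne _ _ (pvG_none_ne_nil _ hne), hget, hget1, pvLine2]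
            · have hnil : argv.drop (i + 2) = [] := List.drop_eq_nil_of_le (by omega)
              rw [if_neg h2, hnil, hget, hget1]
              rfl
        · -- not a flag: single line
          have hcond : (PySem.Str.startswith (argv.getD i "") "--" && decide (i + 1 < argv.length) &&
              !(PySem.Str.startswith (argv.getD (i + 1) "") "--")) = false := by
            simp [hgs, hft]
          rw [hcond]
          simp only [Bool.false_eq_true, if_false]
          rw [if_pos h1, ih (i + 1) (by omega), hdrop]
          have hne1 : argv.drop (i + 1) ≠ [] := by
            intro hc
            have := List.drop_eq_nil_iff.mp hc
            omega
          have : pvG none (argv[i] :: argv.drop (i + 1))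
              = pvLine1 argv[i] :: pvG none (argv.drop (i + 1)) := by
            simp [pvG, hft]
          rw [this, pvDeco_cons_ne _ _ (pvG_none_ne_nil _ hne1), hget, pvLine1]
      · -- last token: single line regardless of the condition
        have hnil1 : argv.drop (i + 1) = [] := List.drop_eq_nil_of_le (by omega)
        have hcond : (PySem.Str.startswith (argv.getD i "") "--" && decide (i + 1 < argv.length) &&
            !(PySem.Str.startswith (argv.getD (i + 1) "") "--")) = false := by
          simp [h1]
        rw [hcond]
        simp only [Bool.false_eq_true, if_false]
        rw [if_neg h1, hdrop, hnil1]
        have : pvDeco (pvG none [argv[i]]) = [pvLine1 argv[i]] := by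
          by_cases hft : PySem.Chars.startswith (argv[i].toList) ['-','-'] = true <;>
            simp [pvG, pvDeco, hft]
        rw [this, hget, pvLine1]
        simp [ih (i + 1) (by omega), hnil1, pvG, pvDeco]
    · have hnil : argv.drop i = [] := List.drop_eq_nil_of_le (by omega)
      rw [hnil]
      simp [pvLoopA, h, pvG, pvDeco]

-- ===== VERDICT (by name: the statement is the Claim_ definition above) =====
theorem format_multiline_cmd_spec : Claim_equal_format_multiline_cmd := by
  intro argv _
  show format_multiline_cmd argv = format_multiline_cmd_alt argv
  by_cases hnil : argv = []
  · subst hnil; rfl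
  · have hlen : 0 < argv.length := List.length_pos_iff.mpr hnil
    by_cases h3 : 3 ≤ argv.length
    · -- head line taken; A's first iteration emits it
      simp only [format_multiline_cmd, format_multiline_cmd_alt, if_neg hnil, if_pos h3]
      rw [pvFlush_foldl (argv.drop 3) [PySem.Str.join " " ((argv.take 3).map pvFmt)] none]
      have hc : (true && decide (3 ≤ argv.length)) = true := by simp [h3]
      have hstep : pvLoopA argv (argv.length + 1) 0 true
          = (PySem.Str.join " " ((argv.take 3).map pvFmt) ++
              (if 3 < argv.length then " \\" else "")) :: pvLoopA argv argv.length 3 false := by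
        rw [pvLoopA, if_pos hlen, if_pos hc]
      rw [hstep, pvLoopA_eq argv argv.length 3 false (Or.inl rfl) (by omega)]
      by_cases h3' : 3 < argv.length
      · have hne : argv.drop 3 ≠ [] := by
          intro hc'
          have := List.drop_eq_nil_iff.mp hc'
          omega
        rw [if_pos h3',
            show ((PySem.Str.join " " ((argv.take 3).map pvFmt) ++ " \\") :: pvDeco (pvG none (argv.drop 3)))
              = pvDeco (PySem.Str.join " " ((argv.take 3).map pvFmt) :: pvG none (argv.drop 3)) from
              (pvDeco_cons_ne _ _ (pvG_none_ne_nil _ hne)).symm,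
            pvJoin_deco]
        simp [pvFlush]
      · have hnil3 : argv.drop 3 = [] := List.drop_eq_nil_of_le (by omega)
        rw [if_neg h3', hnil3]
        simp only [pvFlush, pvG, pvDeco, List.foldl_nil, List.append_nil]
        apply String.toList_inj.mp
        simp [PySem.Str.join, PySem.Chars.join_singleton]
    · simp only [format_multiline_cmd, format_multiline_cmd_alt, if_neg hnil, if_neg h3]
      rw [pvLoopA_eq argv (argv.length + 1) 0 true (Or.inr (by omega)) (by omega),
          List.drop_zero, pvJoin_deco]
      rw [pvFlush_foldl argv [] none]
      simp [pvFlush]
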